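-- pv_equiv track=rewrite | github.com/Egor-05/konfig | konfig_hw.py | ls_funcs
-- ===== SOURCE A (Python) =====
-- def ls_funcs(files, command):
--     f = [j for j in files if '.' in j]
--     dirs = [j for j in files if '.' not in j]
--     lst = f + dirs
--     delim = '\t'
--     for j in command:
--         if j == 'r':
--             lst.sort(reverse=True)
--         elif j == 's':
--             lst.sort()
--         elif j == '1':
--             delim = '\n'
--     return delim.join(lst)
-- ===== SOURCE B (Python) =====
-- def ls_funcs(files, command):
--     # Backward scan with early return: the last sort directive decides everything,
--     # and when one exists the dotted-first partition is irrelevant (sorting a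
--     # permutation gives the same list), so sorted(files) is joined directly;
--     # the partition is built only on the no-directive path.
--     delim = '\n' if '1' in command else '\t'
--     for c in reversed(command):
--         if c == 'r':
--             return delim.join(sorted(files, reverse=True))
--         if c == 's':
--             return delim.join(sorted(files))
--     return delim.join([x for x in files if '.' in x] + [x for x in files if '.' not in x])
-- ===== Notes on version B (the rewrite author's own statement) =====
-- stated objective: simpler
-- what changed: B scans the command backwards and returns early at the last sort directive, sorting the raw files list directly (the dotted-first partition is built only when no sort directive occurs), instead of A's partition-then-resort-on-every-directive forward loop.
import Mathlib
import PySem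

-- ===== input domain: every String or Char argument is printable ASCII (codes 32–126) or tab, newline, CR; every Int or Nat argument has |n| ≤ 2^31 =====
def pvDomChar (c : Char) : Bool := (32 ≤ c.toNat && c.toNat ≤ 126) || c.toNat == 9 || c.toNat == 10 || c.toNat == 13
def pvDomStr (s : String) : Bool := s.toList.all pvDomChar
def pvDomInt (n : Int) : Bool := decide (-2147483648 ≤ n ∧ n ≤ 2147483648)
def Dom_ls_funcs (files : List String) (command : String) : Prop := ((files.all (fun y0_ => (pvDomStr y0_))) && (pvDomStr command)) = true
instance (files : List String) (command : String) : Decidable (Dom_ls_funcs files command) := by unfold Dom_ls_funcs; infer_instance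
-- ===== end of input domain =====

-- B scans the command backwards and returns early at the last sort directive, sorting the
-- raw files list directly (the partition is built only when no directive occurs); simpler
-- than A's partition-then-resort-on-every-directive forward loop.

-- ===== PORT A =====
-- one loop step of A's 'for j in command'
def lsStepA (st : List String × String) (j : Char) : List String × String :=
  if j == 'r' then (PySem.List.sorted st.1 (fun x => x) true, st.2)
  else if j == 's' then (PySem.List.sorted st.1 (fun x => x) false, st.2)
  else if j == '1' then (st.1, "\n")
  else st

def ls_funcs (files : List String) (command : String) : String :=
  let f := files.filter (fun j => PySem.Str.isIn "." j)
  let dirs := files.filter (fun j => !(PySem.Str.isIn "." j))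
  let st := command.toList.foldl lsStepA (f ++ dirs, "\t")
  PySem.Str.join st.2 st.1

-- ===== PORT B =====
-- B's 'for c in reversed(command)' loop with its early returns: recursion over the
-- reversed character list; the base case is B's final partition-joining return.
def lsScan (files : List String) (delim : String) : List Char → String
  | [] => PySem.Str.join delim
      (files.filter (fun x => PySem.Str.isIn "." x)
        ++ files.filter (fun x => !(PySem.Str.isIn "." x)))
  | c :: cs =>
      if c == 'r' then PySem.Str.join delim (PySem.List.sorted files (fun x => x) true)
      else if c == 's' then PySem.Str.join delim (PySem.List.sorted files (fun x => x) false)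
      else lsScan files delim cs

def ls_funcs_alt (files : List String) (command : String) : String :=
  let delim := if PySem.Str.isIn "1" command then "\n" else "\t"
  lsScan files delim command.toList.reverse

-- ===== PRECONDITION & SPEC =====
def Spec_ls_funcs (files : List String) (command : String) (out : String) : Prop := out = ls_funcs_alt files command
instance (files : List String) (command : String) (out : String) : Decidable (Spec_ls_funcs files command out) := by unfold Spec_ls_funcs; infer_instance

-- ===== CLAIM (what is proved, stated in full; the proofs are below) =====
def Claim_equal_ls_funcs : Prop := ∀ (files : List String) (command : String), Dom_ls_funcs files command → Spec_ls_funcs files command (ls_funcs files command)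

-- ===== LEMMAS AND PROOFS =====

-- the last effective 's'/'r' directive of A's forward loop, as a fold
def lsDir (d : Option Bool) (j : Char) : Option Bool :=
  if j == 's' then some false else if j == 'r' then some true else d

-- the first directive of a (reversed) character list -- what B's early-return scan finds
def findDir : List Char → Option Bool
  | [] => none
  | c :: cs => if c == 'r' then some true else if c == 's' then some false else findDir cs

-- apply an optional sort directive
def lsApply (d : Option Bool) (l : List String) : List String :=
  match d with
  | none => l
  | some rev => PySem.List.sorted l (fun x => x) rev

-- sorting with the identity key depends only on the multiset of elements
theorem sorted_id_perm_eq (rev : Bool) (xs ys : List String) (h : xs.Perm ys) :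
    PySem.List.sorted xs (fun x => x) rev = PySem.List.sorted ys (fun x => x) rev := by
  cases rev with
  | false => exact PySem.List.sorted_eq_sorted_of_perm xs ys (fun x => x) (fun _ _ h => h) h
  | true =>
    exact List.Perm.eq_of_pairwise (fun a b _ _ h1 h2 => le_antisymm h2 h1)
      (PySem.List.sorted_pairwise_rev xs (fun x => x))
      (PySem.List.sorted_pairwise_rev ys (fun x => x))
      (((PySem.List.sorted_perm _ _ _).trans h).trans (PySem.List.sorted_perm _ _ _).symm)

-- the directive fold from a non-none start is the fold from none unless no directive occurs
theorem lsDir_foldl_or (cs : List Char) (d : Option Bool) :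
    cs.foldl lsDir d = (cs.foldl lsDir none).or d := by
  induction cs generalizing d with
  | nil => simp
  | cons c cs ih =>
    simp only [List.foldl_cons]
    rw [ih (lsDir d c), ih (lsDir none c)]
    unfold lsDir
    by_cases hs : c == 's'
    · simp only [hs, if_true]
      cases cs.foldl lsDir none <;> simp
    · by_cases hr : c == 'r'
      · simp only [hs, hr, if_true, Bool.false_eq_true, if_false]
        cases cs.foldl lsDir none <;> simp
      · simp only [hs, hr, Bool.false_eq_true, if_false]
        cases cs.foldl lsDir none <;> simp

theorem lsApply_or_sorted (d : Option Bool) (b : Bool) (l : List String) :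
    lsApply (d.or (some b)) l = lsApply d (PySem.List.sorted l (fun x => x) b) := by
  cases d with
  | none => rfl
  | some rev =>
    simp only [lsApply, Option.or]
    exact sorted_id_perm_eq rev l _ (PySem.List.sorted_perm l (fun x => x) b).symm

-- the loop invariant: A's fold = (apply last directive, delimiter from '1'-membership)
theorem loopA_eq (cs : List Char) (lst : List String) (delim : String) :
    cs.foldl lsStepA (lst, delim)
      = (lsApply (cs.foldl lsDir none) lst,
         if cs.contains '1' then "\n" else delim) := by
  induction cs generalizing lst delim with
  | nil => simp [lsApply]
  | cons c cs ih =>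
    rw [List.foldl_cons, List.foldl_cons]
    by_cases hr : c = 'r'
    · subst hr
      rw [show lsStepA (lst, delim) 'r' = (PySem.List.sorted lst (fun x => x) true, delim) from rfl,
          ih, show lsDir none 'r' = some true from rfl, lsDir_foldl_or cs (some true),
          lsApply_or_sorted,
          show (('r' : Char) :: cs).contains '1' = cs.contains '1' by
            simp only [List.contains_cons]
            rw [show (('1' : Char) == 'r') = false from rfl]
            simp]
    · by_cases hs : c = 's'
      · subst hs
        rw [show lsStepA (lst, delim) 's' = (PySem.List.sorted lst (fun x => x) false, delim) from rfl,
            ih, show lsDir none 's' = some false from rfl, lsDir_foldl_or cs (some false),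
            lsApply_or_sorted,
            show (('s' : Char) :: cs).contains '1' = cs.contains '1' by
              simp only [List.contains_cons]
              rw [show (('1' : Char) == 's') = false from rfl]
              simp]
      · by_cases h1 : c = '1'
        · subst h1
          rw [show lsStepA (lst, delim) '1' = (lst, "\n") from rfl, ih,
              show lsDir none '1' = none from rfl,
              show ((('1' : Char) :: cs).contains '1') = true by simp]
          simp
        · have e1 : lsStepA (lst, delim) c = (lst, delim) := by
            simp only [lsStepA]
            rw [show (c == 'r') = false by simpa using hr,
                show (c == 's') = false by simpa using hs,
                show (c == '1') = false by simpa using h1]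
            simp
          have e2 : lsDir none c = none := by
            simp only [lsDir]
            rw [show (c == 's') = false by simpa using hs,
                show (c == 'r') = false by simpa using hr]
            simp
          have e3 : (c :: cs).contains '1' = cs.contains '1' := by
            simp only [List.contains_cons]
            rw [show (('1' : Char) == c) = false by simp; exact fun h => h1 h.symm]
            simp
          rw [e1, ih, e2, e3]

theorem isIn_one (s : String) : PySem.Str.isIn "1" s = s.toList.contains '1' := by
  rcases h : s.toList.contains '1' with _ | _
  · rw [Bool.eq_false_iff]
    intro hin
    have := (PySem.Str.isIn_iff_infix (sub := "1") (s := s)).1 hin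
    have hm : '1' ∈ s.toList := by
      have : ('1' : Char) :: [] <:+: s.toList := this
      exact (List.singleton_infix_iff _ _).1 this
    simp at h; exact h hm
  · apply (PySem.Str.isIn_iff_infix (sub := "1") (s := s)).2
    have hm : '1' ∈ s.toList := by simpa using h
    exact (List.singleton_infix_iff _ _).2 hm

-- findDir distributes over append: the first directive of xs wins
theorem findDir_append (xs ys : List Char) :
    findDir (xs ++ ys) = (findDir xs).or (findDir ys) := by
  induction xs with
  | nil => simp [findDir]
  | cons c cs ih =>
    simp only [List.cons_append, findDir]
    by_cases hr : c == 'r'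
    · simp [hr]
    · by_cases hs : c == 's'
      · simp [hr, hs]
      · simp [hr, hs, ih]

-- the last directive of a forward scan is the first directive of the reversed list
theorem foldl_lsDir_eq_findDir_reverse (cs : List Char) :
    cs.foldl lsDir none = findDir cs.reverse := by
  induction cs with
  | nil => rfl
  | cons c cs ih =>
    rw [List.foldl_cons, lsDir_foldl_or, ih, List.reverse_cons, findDir_append]
    have : lsDir none c = findDir [c] := by
      simp only [lsDir, findDir]
      by_cases hr : c == 'r'
      · have hs : (c == 's') = false := by
          rw [Bool.eq_false_iff]; intro h
          rw [show c = 's' from by simpa using h] at hr; exact absurd hr (by decide)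
        simp [hr, hs]
      · by_cases hs : c == 's' <;> simp [hr, hs]
    rw [this]

-- B's scan computes: join the directive-applied list (sorted files, or the partition)
theorem lsScan_eq (files : List String) (delim : String) (cs : List Char) :
    lsScan files delim cs
      = PySem.Str.join delim
          (match findDir cs with
           | none => files.filter (fun x => PySem.Str.isIn "." x)
               ++ files.filter (fun x => !(PySem.Str.isIn "." x))
           | some rev => PySem.List.sorted files (fun x => x) rev) := by
  induction cs with
  | nil => rfl
  | cons c cs ih =>
    simp only [lsScan, findDir]
    by_cases hr : c == 'r'
    · simp [hr]
    · by_cases hs : c == 's' <;> simp [hr, hs, ih]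

-- sorting the dotted-first partition equals sorting files (it is a permutation of them)
theorem lsApply_partition (d : Option Bool) (files : List String) :
    lsApply d (files.filter (fun x => PySem.Str.isIn "." x)
        ++ files.filter (fun x => !(PySem.Str.isIn "." x)))
      = (match d with
         | none => files.filter (fun x => PySem.Str.isIn "." x)
             ++ files.filter (fun x => !(PySem.Str.isIn "." x))
         | some rev => PySem.List.sorted files (fun x => x) rev) := by
  cases d with
  | none => rfl
  | some rev =>
    exact sorted_id_perm_eq rev _ _ (List.filter_append_perm _ files)

-- ===== VERDICT (by name: the statement is the Claim_ definition above) =====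
theorem ls_funcs_spec : Claim_equal_ls_funcs := by
  intro files command _
  unfold Spec_ls_funcs ls_funcs ls_funcs_alt
  simp only
  rw [loopA_eq, isIn_one, lsScan_eq, ← foldl_lsDir_eq_findDir_reverse, lsApply_partition]
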